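-- pv_equiv track=rewrite | github.com/faustroland/RecRoom-Shirt-Printer | AI_script.py | separate_numbers_and_characters
-- ===== SOURCE A (Python) =====
-- def separate_numbers_and_characters(string):
--   # Initialize empty lists for numbers and characters
--   numbers:int = []
--   characters:char = []
--
--   # Initialize a variable to store the current number
--   current_number = ""
--
--   # Iterate over each character in the string
--   for char in string:
--     # Check if the character is a digit
--     if char.isdecimal():
--       # If it is a digit, add it to the current number
--       current_number += char
--     else:
--       # If it is not a digit, append the current number (if it is not empty) to the numbers list and reset the current number
--       if current_number:
--         numbers.append(current_number)
--         current_number = ""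
--       # Append the character to the characters list
--       characters.append(char)
--
--   # After the loop is finished, check if there is a remaining number (if the string ends with a number)
--   if current_number:
--     numbers.append(current_number)
--
--   # Return the numbers and characters lists
--   return numbers, characters
-- ===== SOURCE B (Python) =====
-- def separate_numbers_and_characters(string):
--   # Run-based scan: consume each maximal decimal run as one slice,
--   # non-digit characters one at a time (no accumulator, no end flush).
--   numbers = []
--   characters = []
--   i, n = 0, len(string)
--   while i < n:
--     if string[i].isdecimal():
--       j = i
--       while j < n and string[j].isdecimal():
--         j += 1
--       numbers.append(string[i:j])
--       i = j
--     else: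
--       characters.append(string[i])
--       i += 1
--   return numbers, characters
-- ===== Notes on version B (the rewrite author's own statement) =====
-- stated objective: alternative
-- what changed: B replaces A's per-character accumulator with an end-of-loop flush by a two-pointer run scan that slices each maximal decimal run out of the string directly.
import Mathlib
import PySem

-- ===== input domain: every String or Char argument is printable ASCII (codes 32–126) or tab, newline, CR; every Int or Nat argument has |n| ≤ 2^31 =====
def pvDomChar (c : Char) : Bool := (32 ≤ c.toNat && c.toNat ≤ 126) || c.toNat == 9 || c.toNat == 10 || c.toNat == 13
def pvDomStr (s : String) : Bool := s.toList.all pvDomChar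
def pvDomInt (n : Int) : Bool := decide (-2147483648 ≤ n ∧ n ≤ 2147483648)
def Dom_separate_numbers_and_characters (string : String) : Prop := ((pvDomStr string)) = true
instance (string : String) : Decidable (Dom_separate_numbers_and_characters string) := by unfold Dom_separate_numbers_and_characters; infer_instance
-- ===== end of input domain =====

-- B scans maximal decimal runs with two pointers instead of A's per-char accumulator + flush; same return value (alternative decomposition).
-- ===== PORT A =====
-- char.isdecimal() : exact on the ASCII domain (only '0'..'9' are decimal there)
def pvIsDec (c : Char) : Bool := '0' ≤ c && c ≤ '9'

-- the for-loop of A: state = (numbers, characters, current_number)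
def sepAGo : List Char → List String → List String → List Char → List String × List String
  | [], nums, chars, cur =>
      if cur ≠ [] then (nums ++ [String.ofList cur], chars) else (nums, chars)
  | c :: rest, nums, chars, cur =>
      if pvIsDec c then sepAGo rest nums chars (cur ++ [c])
      else if cur ≠ [] then sepAGo rest (nums ++ [String.ofList cur]) (chars ++ [String.ofList [c]]) []
      else sepAGo rest nums (chars ++ [String.ofList [c]]) []

def separate_numbers_and_characters (string : String) : List String × List String :=
  sepAGo string.toList [] [] []

-- ===== PORT B =====
-- the while-loop of B: at a digit, take the whole maximal run (string[i:j]) and jump past it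
def sepBGo : List Char → List String → List String → List String × List String
  | [], nums, chars => (nums, chars)
  | c :: rest, nums, chars =>
      if pvIsDec c then
        sepBGo (rest.dropWhile pvIsDec)
          (nums ++ [String.ofList (c :: rest.takeWhile pvIsDec)]) chars
      else sepBGo rest nums (chars ++ [String.ofList [c]])
termination_by l => l.length
decreasing_by
  · exact Nat.lt_succ_of_le (List.length_dropWhile_le _ _)
  · exact Nat.lt_succ_self _

def separate_numbers_and_characters_alt (string : String) : List String × List String :=
  sepBGo string.toList [] []

-- ===== PRECONDITION & SPEC =====
def Spec_separate_numbers_and_characters (string : String) (out : List String × List String) : Prop := out = separate_numbers_and_characters_alt string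
instance (string : String) (out : List String × List String) : Decidable (Spec_separate_numbers_and_characters string out) := by unfold Spec_separate_numbers_and_characters; infer_instance

-- ===== CLAIM (what is proved, stated in full; the proofs are below) =====
def Claim_equal_separate_numbers_and_characters : Prop := ∀ (string : String), Dom_separate_numbers_and_characters string → Spec_separate_numbers_and_characters string (separate_numbers_and_characters string)

-- ===== LEMMAS AND PROOFS =====
-- A's loop with pending run cur equals B's run scan with cur glued onto the first run.
lemma sepAGo_eq_sepBGo (l : List Char) : ∀ (nums chars : List String) (cur : List Char),
    sepAGo l nums chars cur =
      if cur = [] then sepBGo l nums chars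
      else sepBGo (l.dropWhile pvIsDec)
        (nums ++ [String.ofList (cur ++ l.takeWhile pvIsDec)]) chars := by
  induction l with
  | nil =>
      intro nums chars cur
      by_cases h : cur = [] <;> simp [sepAGo, sepBGo, h]
  | cons c rest ih =>
      intro nums chars cur
      by_cases hc : pvIsDec c = true
      · by_cases h : cur = []
        · simp [sepAGo, sepBGo, hc, h, ih]
        · simp [sepAGo, sepBGo, hc, h, ih]
      · by_cases h : cur = []
        · simp [sepAGo, sepBGo, hc, h, ih]
        · simp [sepAGo, sepBGo, hc, h, ih]

-- ===== VERDICT (by name: the statement is the Claim_ definition above) =====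
theorem separate_numbers_and_characters_spec : Claim_equal_separate_numbers_and_characters := by
  intro s _
  unfold Spec_separate_numbers_and_characters separate_numbers_and_characters separate_numbers_and_characters_alt
  simp [sepAGo_eq_sepBGo]
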